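-- pv_equiv track=rewrite | github.com/sujithagogada/GIGAAnswer | solution.py | order_food
-- ===== SOURCE A (Python) =====
-- def order_food(lst):
--     standard=0
--     vegetarian =0
--     vegan =0
--     diabetic =0
--     gluten_intolerant=0
--     for i in lst:
--         for key in i.keys():
--             if key == 'meal':
--                 if i[key]=='standard':
--                    standard=standard+1
--                 elif i[key]=='vegetarian':
--                    vegetarian=vegetarian+1
--                 elif i[key]=='vegan':
--                    vegan=vegan+1
--                 elif i[key]=='diabetic':
--                    diabetic=diabetic+1
--                 else:
--                    gluten_intolerant=gluten_intolerant+1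
--     dictory=dict()
--     if standard !=0:
--        dictory['standard']=standard
--     if vegetarian !=0:
--        dictory['vegetarian']=vegetarian
--     if vegan !=0:
--        dictory['vegan']=vegan
--     if  diabetic !=0:
--        dictory['diabetic']=diabetic
--     if gluten_intolerant !=0:
--        dictory['gluten-intolerant']=gluten_intolerant
--     return dictory
-- ===== SOURCE B (Python) =====
-- def order_food(lst):
--     meals = [i['meal'] for i in lst if 'meal' in i]
--     standard = meals.count('standard')
--     vegetarian = meals.count('vegetarian')
--     vegan = meals.count('vegan')
--     diabetic = meals.count('diabetic')
--     gluten_intolerant = len(meals) - (standard + vegetarian + vegan + diabetic)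
--     result = {}
--     for name, n in (('standard', standard), ('vegetarian', vegetarian),
--                     ('vegan', vegan), ('diabetic', diabetic),
--                     ('gluten-intolerant', gluten_intolerant)):
--         if n:
--             result[name] = n
--     return result
-- ===== Notes on version B (the rewrite author's own statement) =====
-- stated objective: simpler
-- what changed: Replaces the per-dict key scan with five running counters by a single extraction of the 'meal' values followed by count() calls, computing the catch-all as len(meals) minus the four named counts, and builds the result dict by one data-driven loop over (name, count) pairs.
import Mathlib
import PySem

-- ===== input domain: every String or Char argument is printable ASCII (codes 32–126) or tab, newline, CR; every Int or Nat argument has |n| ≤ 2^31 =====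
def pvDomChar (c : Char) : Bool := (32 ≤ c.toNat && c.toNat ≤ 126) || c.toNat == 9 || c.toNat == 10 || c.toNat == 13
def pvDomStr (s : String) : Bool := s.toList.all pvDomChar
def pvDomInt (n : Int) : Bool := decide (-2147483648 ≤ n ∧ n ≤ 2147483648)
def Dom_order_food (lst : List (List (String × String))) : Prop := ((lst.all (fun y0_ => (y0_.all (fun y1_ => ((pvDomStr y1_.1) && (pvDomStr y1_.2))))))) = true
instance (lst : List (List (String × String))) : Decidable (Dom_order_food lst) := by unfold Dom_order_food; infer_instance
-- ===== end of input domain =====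

-- B extracts the 'meal' values once and derives the five counts from count() and a length
-- difference, instead of A's per-key scan with five running counters (objective: simpler).


-- ===== PORT A =====
-- A-side helper: the body of A's inner `for key in i.keys():` loop over the 5-counter state.
-- `i[key]` is ported as `(d.get? key).getD ""`; the default is never read since key ∈ d.keys.
def mealStep (d : PySem.Dict String String) (c : Int × Int × Int × Int × Int) (key : String) :
    Int × Int × Int × Int × Int :=
  if key == "meal" then
    let v := (d.get? key).getD ""
    if v == "standard" then (c.1 + 1, c.2.1, c.2.2.1, c.2.2.2.1, c.2.2.2.2)
    else if v == "vegetarian" then (c.1, c.2.1 + 1, c.2.2.1, c.2.2.2.1, c.2.2.2.2)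
    else if v == "vegan" then (c.1, c.2.1, c.2.2.1 + 1, c.2.2.2.1, c.2.2.2.2)
    else if v == "diabetic" then (c.1, c.2.1, c.2.2.1, c.2.2.2.1 + 1, c.2.2.2.2)
    else (c.1, c.2.1, c.2.2.1, c.2.2.2.1, c.2.2.2.2 + 1)
  else c

def order_food (lst : List (List (String × String))) : List (String × Int) :=
  let fin := lst.foldl
    (fun c i =>
      let d := PySem.Dict.mk i
      d.keys.foldl (mealStep d) c)
    ((0, 0, 0, 0, 0) : Int × Int × Int × Int × Int)
  let dict0 : PySem.Dict String Int := PySem.Dict.empty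
  let dict1 := if fin.1 ≠ 0 then dict0.insert "standard" fin.1 else dict0
  let dict2 := if fin.2.1 ≠ 0 then dict1.insert "vegetarian" fin.2.1 else dict1
  let dict3 := if fin.2.2.1 ≠ 0 then dict2.insert "vegan" fin.2.2.1 else dict2
  let dict4 := if fin.2.2.2.1 ≠ 0 then dict3.insert "diabetic" fin.2.2.2.1 else dict3
  let dict5 := if fin.2.2.2.2 ≠ 0 then dict4.insert "gluten-intolerant" fin.2.2.2.2 else dict4
  dict5.items

-- ===== PORT B =====
def order_food_alt (lst : List (List (String × String))) : List (String × Int) :=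
  let meals := lst.filterMap (fun i => (PySem.Dict.mk i).get? "meal")
  let standard : Int := meals.count "standard"
  let vegetarian : Int := meals.count "vegetarian"
  let vegan : Int := meals.count "vegan"
  let diabetic : Int := meals.count "diabetic"
  let gluten_intolerant : Int := (meals.length : Int) - (standard + vegetarian + vegan + diabetic)
  (([("standard", standard), ("vegetarian", vegetarian), ("vegan", vegan),
     ("diabetic", diabetic), ("gluten-intolerant", gluten_intolerant)] : List (String × Int)).foldl
    (fun r p => if p.2 ≠ 0 then r.insert p.1 p.2 else r) PySem.Dict.empty).items

-- ===== PRECONDITION & SPEC =====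
-- Pre_ excludes inner association lists with duplicate keys: a Python dict has unique keys,
-- so such lists do not encode any input A could receive (the encoding is ambiguous there).
def Pre_order_food (lst : List (List (String × String))) : Prop :=
  ∀ i ∈ lst, (i.map Prod.fst).Nodup
instance (lst : List (List (String × String))) : Decidable (Pre_order_food lst) := by
  unfold Pre_order_food; infer_instance

def pvWitness_order_food : (List (List (String × String))) :=
  [[("meal", "vegan"), ("name", "bo")], [("drink", "tea")], [("meal", "hallal")]]

def Spec_order_food (lst : List (List (String × String))) (out : List (String × Int)) : Prop := out = order_food_alt lst
instance (lst : List (List (String × String))) (out : List (String × Int)) : Decidable (Spec_order_food lst out) := by unfold Spec_order_food; infer_instance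

-- ===== CLAIM (what is proved, stated in full; the proofs are below) =====
def Claim_equal_order_food : Prop := ∀ (lst : List (List (String × String))), Dom_order_food lst → Pre_order_food lst → Spec_order_food lst (order_food lst)

-- ===== LEMMAS AND PROOFS =====

-- what one 'meal' value contributes to A's 5-counter state
def mealBump (c : Int × Int × Int × Int × Int) (v : String) : Int × Int × Int × Int × Int :=
  if v == "standard" then (c.1 + 1, c.2.1, c.2.2.1, c.2.2.2.1, c.2.2.2.2)
  else if v == "vegetarian" then (c.1, c.2.1 + 1, c.2.2.1, c.2.2.2.1, c.2.2.2.2)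
  else if v == "vegan" then (c.1, c.2.1, c.2.2.1 + 1, c.2.2.2.1, c.2.2.2.2)
  else if v == "diabetic" then (c.1, c.2.1, c.2.2.1, c.2.2.2.1 + 1, c.2.2.2.2)
  else (c.1, c.2.1, c.2.2.1, c.2.2.2.1, c.2.2.2.2 + 1)

lemma foldl_mealStep_no_meal (d : PySem.Dict String String) (ks : List String)
    (h : "meal" ∉ ks) (c : Int × Int × Int × Int × Int) :
    ks.foldl (mealStep d) c = c := by
  induction ks generalizing c with
  | nil => rfl
  | cons k ks ih =>
    have hk : k ≠ "meal" := fun hkk => h (hkk ▸ List.mem_cons_self)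
    have hks : "meal" ∉ ks := fun hm => h (List.mem_cons_of_mem _ hm)
    simp [List.foldl_cons, mealStep, hk, ih hks]

lemma foldl_mealStep_eq (i : List (String × String)) (h : (i.map Prod.fst).Nodup)
    (c : Int × Int × Int × Int × Int) :
    (PySem.Dict.mk i).keys.foldl (mealStep (PySem.Dict.mk i)) c =
      match (PySem.Dict.mk i).get? "meal" with
      | none => c
      | some v => mealBump c v := by
  by_cases hm : "meal" ∈ (PySem.Dict.mk i).keys
  · rcases hv : (PySem.Dict.mk i).get? "meal" with _ | v
    · exact absurd ((PySem.Dict.get?_eq_none_iff_not_mem_keys _ _).mp hv) (fun a => a hm)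
    · obtain ⟨s, t, hst⟩ := List.append_of_mem hm
      have hnd : (s ++ "meal" :: t).Nodup := by
        rw [← hst]; simpa [PySem.Dict.keys_mk] using h
      obtain ⟨-, hct, hdisj⟩ := List.nodup_append.mp hnd
      have hs : "meal" ∉ s := fun hin => hdisj "meal" hin "meal" List.mem_cons_self rfl
      have ht : "meal" ∉ t := (List.nodup_cons.mp hct).1
      rw [hst, List.foldl_append, foldl_mealStep_no_meal _ s hs, List.foldl_cons,
        foldl_mealStep_no_meal _ t ht]
      simp [mealStep, mealBump, hv]
  · rw [(PySem.Dict.get?_eq_none_iff_not_mem_keys _ _).mpr hm]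
    exact foldl_mealStep_no_meal _ _ hm c

lemma foldl_outer (lst : List (List (String × String))) (h : Pre_order_food lst)
    (c : Int × Int × Int × Int × Int) :
    lst.foldl (fun c i => let d := PySem.Dict.mk i; d.keys.foldl (mealStep d) c) c =
      (let meals := lst.filterMap (fun i => (PySem.Dict.mk i).get? "meal")
       (c.1 + (meals.count "standard" : Int),
        c.2.1 + (meals.count "vegetarian" : Int),
        c.2.2.1 + (meals.count "vegan" : Int),
        c.2.2.2.1 + (meals.count "diabetic" : Int),
        c.2.2.2.2 + ((meals.length : Int) -
          ((meals.count "standard" : Int) + (meals.count "vegetarian" : Int) +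
           (meals.count "vegan" : Int) + (meals.count "diabetic" : Int))))) := by
  induction lst generalizing c with
  | nil => simp
  | cons i rest ih =>
    have hi : (i.map Prod.fst).Nodup := h i List.mem_cons_self
    have hrest : Pre_order_food rest := fun j hj => h j (List.mem_cons_of_mem _ hj)
    rw [List.foldl_cons]
    simp only [List.filterMap_cons]
    rw [foldl_mealStep_eq i hi c]
    rcases hv : (PySem.Dict.mk i).get? "meal" with _ | v
    · exact ih hrest c
    · rw [ih hrest (mealBump c v)]
      simp only [mealBump]
      split_ifs with h1 h2 h3 h4 <;>
        simp_all [beq_iff_eq, List.length_cons] <;>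
        (try constructor) <;> omega

-- ===== VERDICT (by name: the statement is the Claim_ definition above) =====
theorem order_food_spec : Claim_equal_order_food := by
  intro lst _ hpre
  unfold Spec_order_food order_food order_food_alt
  rw [foldl_outer lst hpre]
  simp only [List.foldl_cons, List.foldl_nil, zero_add]
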